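-- pv_equiv track=rewrite | github.com/DaveTCode/aoc2021 | day17/main.py | valid_xs
-- ===== SOURCE A (Python) =====
-- from typing import Tuple, List, Set
--
-- def valid_xs(target: Tuple[int, int]) -> List[Tuple[int, Set[int]]]:
--     valid = []
--     for init_v in range(1, target[1] + 1):
--         v = init_v
--         x = steps = 0
--         valid_steps = set()
--         while x < target[1] and not v == 0:
--             steps += 1
--             x += v
--             v = v - 1 if v > 0 else v + 1 if v < 0 else 0
--             if target[1] >= x >= target[0]:
--                 valid_steps.add(steps)
--                 if v == 0:
--                     valid_steps = valid_steps.union(set(range(steps + 1, 10000)))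
--         if valid_steps:
--             valid.append((init_v, valid_steps))
--
--     return valid
-- ===== SOURCE B (Python) =====
-- from typing import Tuple, List, Set
--
--
-- def valid_xs(target: Tuple[int, int]) -> List[Tuple[int, Set[int]]]:
--     # Closed form: after s steps with initial velocity v, x(s) = s*v - s*(s-1)//2,
--     # strictly increasing up to s = v.  So the valid steps form one contiguous
--     # window [a, b], found by two binary searches instead of step-by-step simulation.
--     lo, hi = target
--     valid = []
--     for init_v in range(1, hi + 1):
--         rest = init_v * (init_v + 1) // 2  # position once the velocity hits 0
--         if rest < lo:
--             continue  # the probe never reaches the band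
--         # a = least s in [1, init_v] with x(s) >= lo
--         a, r = 1, init_v
--         while a < r:
--             m = (a + r) // 2
--             if m * init_v - m * (m - 1) // 2 >= lo:
--                 r = m
--             else:
--                 a = m + 1
--         if a * init_v - a * (a - 1) // 2 > hi:
--             continue  # the window is empty: the probe jumps over the band
--         # b = greatest s in [a, init_v] with x(s) <= hi
--         b, r = a, init_v
--         while b < r:
--             m = (b + r + 1) // 2
--             if m * init_v - m * (m - 1) // 2 <= hi:
--                 b = m
--             else:
--                 r = m - 1
--         steps = set(range(a, b + 1))
--         if b == init_v:  # the probe comes to rest inside the band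
--             steps |= set(range(init_v + 1, 10000))
--         valid.append((init_v, steps))
--     return valid
-- ===== Notes on version B (the rewrite author's own statement) =====
-- stated objective: alternative
-- what changed: Replaces the per-step x/v state-machine simulation of each trajectory by the closed-form position x(s) = s*v - s*(s-1)//2, which is monotone up to the resting step, so the valid steps form one contiguous window located by two binary searches (plus the same rest extension).
import Mathlib
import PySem

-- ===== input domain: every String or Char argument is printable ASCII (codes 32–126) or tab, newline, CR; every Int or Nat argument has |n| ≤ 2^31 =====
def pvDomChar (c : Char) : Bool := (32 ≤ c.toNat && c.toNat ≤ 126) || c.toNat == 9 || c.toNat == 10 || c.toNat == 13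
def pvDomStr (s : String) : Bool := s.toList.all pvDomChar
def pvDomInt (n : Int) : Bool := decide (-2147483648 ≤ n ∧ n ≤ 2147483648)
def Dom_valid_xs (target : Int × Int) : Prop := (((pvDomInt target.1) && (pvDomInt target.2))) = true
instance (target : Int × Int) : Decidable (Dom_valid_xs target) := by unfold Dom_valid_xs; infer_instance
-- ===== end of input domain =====

-- B replaces A's per-step x/v simulation by the closed-form position s*v - s*(s-1)//2 and two
-- binary searches locating the contiguous window of valid steps (objective: alternative algorithm).

-- ===== PORT A =====
-- inner while loop of A; fuel = v.toNat is exact since v starts at init_v ≥ 1 and decreases by 1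
-- every iteration, stopping at v = 0 (the fuel is only a termination device)
def valid_xs_loop (lo hi : Int) : Nat → Int → Int → Int → PySem.Set Int → PySem.Set Int
  | 0, _, _, _, acc => acc
  | n+1, v, x, steps, acc =>
    if x < hi ∧ ¬ v = 0 then
      let steps1 := steps + 1
      let x1 := x + v
      let v1 := if v > 0 then v - 1 else if v < 0 then v + 1 else 0
      let acc1 := if hi ≥ x1 ∧ x1 ≥ lo then
          let a1 := PySem.Set.add acc steps1
          if v1 = 0 then PySem.Set.union a1 (PySem.Set.ofList (PySem.List.pyRange (steps1+1) 10000 1))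
          else a1
        else acc
      valid_xs_loop lo hi n v1 x1 steps1 acc1
    else acc

def valid_xs (target : Int × Int) : List (Int × List Int) :=
  (PySem.List.pyRange 1 (target.2 + 1) 1).foldl (fun valid init_v =>
    let vs := valid_xs_loop target.1 target.2 init_v.toNat init_v 0 0 PySem.Set.empty
    if ¬ vs = [] then valid ++ [(init_v, vs)] else valid) []

-- ===== PORT B =====
-- port of Source B's helper _x: position after s steps from initial velocity v
def bX (s v : Int) : Int := s * v - PySem.Int.floordiv (s * (s - 1)) 2

-- first binary search of Source B: least s in [a, r] with _x(s, v) >= lo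
def bSearchLow (lo v : Int) (a r : Int) : Int :=
  if h : a < r then
    let m := PySem.Int.floordiv (a + r) 2
    if lo ≤ bX m v then bSearchLow lo v a m else bSearchLow lo v (m + 1) r
  else a
termination_by (r - a).toNat
decreasing_by
  · have := PySem.Int.floordiv_two_mid_bounds (le_of_lt h)
    rw [PySem.Int.floordiv_eq_ediv_of_pos (by norm_num)] at *
    omega
  · have := PySem.Int.floordiv_two_mid_bounds (le_of_lt h)
    omega

-- second binary search of Source B: greatest s in [b, r] with _x(s, v) <= hi
def bSearchHigh (hi v : Int) (b r : Int) : Int :=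
  if h : b < r then
    let m := PySem.Int.floordiv (b + r + 1) 2
    if bX m v ≤ hi then bSearchHigh hi v m r else bSearchHigh hi v b (m - 1)
  else b
termination_by (r - b).toNat
decreasing_by
  · have := PySem.Int.floordiv_two_mid_bounds (lo := b + 1) (hi := r) (by omega)
    rw [PySem.Int.floordiv_eq_ediv_of_pos (by norm_num)] at *
    omega
  · have := PySem.Int.floordiv_two_mid_bounds (lo := b + 1) (hi := r) (by omega)
    rw [PySem.Int.floordiv_eq_ediv_of_pos (by norm_num)] at *
    omega

def valid_xs_alt (target : Int × Int) : List (Int × List Int) :=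
  (PySem.List.pyRange 1 (target.2 + 1) 1).foldl (fun valid init_v =>
    let rest := PySem.Int.floordiv (init_v * (init_v + 1)) 2
    if rest < target.1 then valid
    else
      let a := bSearchLow target.1 init_v 1 init_v
      if target.2 < bX a init_v then valid
      else
        let b := bSearchHigh target.2 init_v a init_v
        let steps := PySem.Set.ofList (PySem.List.pyRange a (b + 1) 1)
        let steps := if b = init_v then
            PySem.Set.union steps (PySem.Set.ofList (PySem.List.pyRange (init_v + 1) 10000 1))
          else steps
        valid ++ [(init_v, steps)]) []

-- ===== PRECONDITION & SPEC =====
def Spec_valid_xs (target : Int × Int) (out : List (Int × List Int)) : Prop := out = valid_xs_alt target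
instance (target : Int × Int) (out : List (Int × List Int)) : Decidable (Spec_valid_xs target out) := by unfold Spec_valid_xs; infer_instance

-- ===== CLAIM (what is proved, stated in full; the proofs are below) =====
def Claim_equal_valid_xs : Prop := ∀ (target : Int × Int), Dom_valid_xs target → Spec_valid_xs target (valid_xs target)

-- ===== LEMMAS AND PROOFS =====

-- x(s+1) = x(s) + (v - s)
theorem bX_succ (v s : Int) : bX (s + 1) v = bX s v + (v - s) := by
  unfold bX
  obtain ⟨k, hk⟩ := Int.even_mul_succ_self (s - 1)
  have e0 : s * (s - 1) = k + k := by rw [← hk]; ring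
  have e1 : (s + 1) * ((s + 1) - 1) = s * (s - 1) + 2 * s := by ring
  have e2 : (s + 1) * v = s * v + v := by ring
  rw [e1, e2, e0, PySem.Int.floordiv_eq_ediv_of_pos (by norm_num),
    PySem.Int.floordiv_eq_ediv_of_pos (by norm_num)]
  omega

theorem bX_mono_nat (v s : Int) : ∀ (d : Nat), s + d ≤ v → bX s v ≤ bX (s + d) v := by
  intro d
  induction d with
  | zero => simp
  | succ d ih =>
    intro h
    have h1 : s + (d : Int) ≤ v := by push_cast at h ⊢; omega
    have h2 := bX_succ v (s + d)
    have h3 : s + ((d : Nat) + 1 : Nat) = (s + d) + 1 := by push_cast; ring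
    rw [h3, h2]
    have := ih h1
    omega

-- x is monotone in the step up to the resting step s = v
theorem bX_mono (v s t : Int) (hst : s ≤ t) (htv : t ≤ v) : bX s v ≤ bX t v := by
  obtain ⟨d, hd⟩ : ∃ d : Nat, t = s + d := ⟨(t - s).toNat, by omega⟩
  subst hd
  exact bX_mono_nat v s d (by omega)

theorem bX_zero (v : Int) : bX 0 v = 0 := by
  unfold bX
  rw [PySem.Int.floordiv_eq_ediv_of_pos (by norm_num)]
  norm_num

-- Source B's rest position equals x(v, v)
theorem rest_eq (v : Int) : PySem.Int.floordiv (v * (v + 1)) 2 = bX v v := by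
  unfold bX
  obtain ⟨k, hk⟩ := Int.even_mul_succ_self (v - 1)
  have e0 : v * (v - 1) = k + k := by rw [← hk]; ring
  have e1 : v * (v + 1) = v * (v - 1) + 2 * v := by ring
  have e2 : v * v = v * (v - 1) + v := by ring
  rw [e1, e2, e0, PySem.Int.floordiv_eq_ediv_of_pos (by norm_num),
    PySem.Int.floordiv_eq_ediv_of_pos (by norm_num)]
  omega

-- proof-side recursion: the list of steps A's loop appends after step k
def WSteps (lo hi v : Int) : Nat → Int → List Int
  | 0, _ => []
  | n+1, k =>
    if bX k v < hi then
      if lo ≤ bX (k+1) v ∧ bX (k+1) v ≤ hi then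
        (k+1) :: (if n = 0 then PySem.List.pyRange (k+2) 10000 1 else WSteps lo hi v n (k+1))
      else WSteps lo hi v n (k+1)
    else []

theorem loop_eq_WSteps (lo hi v : Int) : ∀ (n : Nat) (k : Int) (acc : List Int),
    v = k + n → acc.Nodup → (∀ e ∈ acc, e ≤ k) →
    valid_xs_loop lo hi n (v - k) (bX k v) k acc = acc ++ WSteps lo hi v n k := by
  intro n
  induction n with
  | zero => intro k acc h _ _; simp [valid_xs_loop, WSteps]
  | succ n ih =>
    intro k acc hv hnd hb
    have hkn : k + 1 ∉ acc := fun hm => by have := hb _ hm; omega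
    have hvk : v - k = (n : Int) + 1 := by omega
    have hs : bX k v + (v - k) = bX (k + 1) v := by rw [bX_succ]
    rw [valid_xs_loop, WSteps]
    by_cases hx : bX k v < hi
    · rw [if_pos ⟨hx, by omega⟩, if_pos hx]
      have hx1 : bX k v + ((n : Int) + 1) = bX (k + 1) v := by rw [← hs, hvk]
      simp only [hvk, gt_iff_lt, show (0:Int) < (n:Int) + 1 from by omega, if_true,
        add_sub_cancel_right, hx1]
      by_cases hp : lo ≤ bX (k + 1) v ∧ bX (k + 1) v ≤ hi
      · rw [if_pos ⟨hp.2, hp.1⟩, if_pos hp]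
        rw [PySem.Set.add_of_not_mem hkn]
        by_cases hn0 : (n : Int) = 0
        · have hn0' : n = 0 := by omega
          subst hn0'
          simp only [Nat.cast_zero] at *
          simp only [if_true]
          have hR : PySem.Set.ofList (PySem.List.pyRange (k + 1 + 1) 10000 1) =
              PySem.List.pyRange (k + 1 + 1) 10000 1 :=
            PySem.Set.ofList_eq_self_of_nodup _ (PySem.List.nodup_pyRange_one _ _)
          rw [hR]
          rw [valid_xs_loop]
          rw [show PySem.Set.union (acc ++ [k+1]) (PySem.List.pyRange (k + 1 + 1) 10000 1) =
              (acc ++ [k+1]) ++ PySem.List.pyRange (k + 1 + 1) 10000 1 from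
            PySem.Set.update_eq_append_of_disjoint _ _ (PySem.List.nodup_pyRange_one _ _)
              (fun x hx hmem => by
                have h1 := PySem.List.mem_pyRange_one.mp hx
                simp only [List.mem_append, List.mem_singleton] at hmem
                rcases hmem with h2 | h2
                · have := hb _ h2; omega
                · omega)]
          simp [show k + 2 = k + 1 + 1 by ring]
        · have hn0' : ¬ n = 0 := fun h => hn0 (by simp [h])
          rw [if_neg hn0, if_neg hn0']
          have hrec := ih (k + 1) (acc ++ [k + 1]) (by omega)
            (hnd.append (List.nodup_singleton _)
              (fun a ha hmem => by
                simp only [List.mem_singleton] at hmem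
                subst hmem; exact hkn ha))
            (by intro e he
                simp only [List.mem_append, List.mem_singleton] at he
                rcases he with h | h
                · have := hb _ h; omega
                · omega)
          rw [show (v - (k + 1)) = (n : Int) by omega] at hrec
          rw [hrec]
          simp
      · rw [if_neg (fun hc => hp ⟨hc.2, hc.1⟩), if_neg hp]
        have hrec := ih (k + 1) acc (by omega) hnd (fun e he => by have := hb _ he; omega)
        rw [show (v - (k + 1)) = (n : Int) by omega] at hrec
        rw [hrec]
    · rw [if_neg (fun hc => hx hc.1), if_neg hx]
      simp

theorem WSteps_closed (lo hi v : Int) : ∀ (n : Nat) (k : Int), v = k + n → 0 ≤ k →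
    WSteps lo hi v n k =
      (PySem.List.pyRange (k+1) (v+1) 1).filter (fun s => decide (lo ≤ bX s v ∧ bX s v ≤ hi))
      ++ (if k < v ∧ lo ≤ bX v v ∧ bX v v ≤ hi then PySem.List.pyRange (v+1) 10000 1 else []) := by
  intro n
  induction n with
  | zero =>
    intro k hv hk
    have hkv : k = v := by omega
    subst hkv
    rw [if_neg (fun h => lt_irrefl _ h.1)]
    simp [WSteps]
  | succ n ih =>
    intro k hv hk
    have hkv : k < v := by omega
    rw [WSteps]
    by_cases hx : bX k v < hi
    · rw [if_pos hx]
      rw [PySem.List.pyRange_one_cons (show k + 1 < v + 1 by omega), List.filter_cons]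
      by_cases hp : lo ≤ bX (k+1) v ∧ bX (k+1) v ≤ hi
      · rw [if_pos hp]
        simp only [decide_eq_true_eq]
        rw [if_pos hp]
        by_cases hn0 : n = 0
        · subst hn0
          rw [if_pos rfl]
          have hk1v : k + 1 = v := by omega
          have hrange : PySem.List.pyRange (k+1+1) (v+1) 1 = [] := by
            rw [hk1v]; simp
          rw [hrange]
          have hext : (k < v ∧ lo ≤ bX v v ∧ bX v v ≤ hi) := ⟨hkv, hk1v ▸ hp⟩
          rw [if_pos hext]
          simp [show k + 2 = v + 1 by omega]
        · rw [if_neg hn0]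
          rw [ih (k+1) (by omega) (by omega)]
          have hiff : (k+1 < v ∧ lo ≤ bX v v ∧ bX v v ≤ hi) ↔
              (k < v ∧ lo ≤ bX v v ∧ bX v v ≤ hi) := by
            constructor
            · intro h; exact ⟨by omega, h.2⟩
            · intro h; exact ⟨by omega, h.2⟩
          rw [if_congr hiff rfl rfl, show k+1+1 = k+2 by ring]
          simp
      · rw [if_neg hp]
        simp only [decide_eq_true_eq]
        rw [if_neg hp]
        rw [ih (k+1) (by omega) (by omega)]
        have hiff : (k+1 < v ∧ lo ≤ bX v v ∧ bX v v ≤ hi) ↔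
            (k < v ∧ lo ≤ bX v v ∧ bX v v ≤ hi) := by
          constructor
          · intro h; exact ⟨by omega, h.2⟩
          · intro h
            rcases Nat.eq_zero_or_pos n with h0 | h0
            · exfalso
              have hv1 : v = k + 1 := by omega
              subst hv1
              exact hp h.2
            · exact ⟨by omega, h.2⟩
        rw [if_congr hiff rfl rfl, show k+1+1 = k+2 by ring]
    · rw [if_neg hx]
      have hgt : ∀ s, k + 1 ≤ s → s ≤ v → hi < bX s v := by
        intro s h1 h2
        have h3 : bX (k+1) v ≤ bX s v := bX_mono v (k+1) s h1 h2
        have h4 : bX (k+1) v = bX k v + (v - k) := bX_succ v k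
        omega
      have hfil : (PySem.List.pyRange (k+1) (v+1) 1).filter
          (fun s => decide (lo ≤ bX s v ∧ bX s v ≤ hi)) = [] := by
        rw [List.filter_eq_nil_iff]
        intro s hs
        have := PySem.List.mem_pyRange_one.mp hs
        have := hgt s this.1 (by omega)
        simp; omega
      rw [hfil, if_neg]
      · simp
      · intro h
        have := hgt v (by omega) le_rfl
        omega

theorem filter_pyRange_nil {u w : Int} (p : Int → Bool)
    (h : ∀ s, u ≤ s → s < w → p s = false) :
    (PySem.List.pyRange u w 1).filter p = [] := by
  rw [List.filter_eq_nil_iff]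
  intro s hs
  have hm := PySem.List.mem_pyRange_one.mp hs
  simp [h s hm.1 hm.2]

theorem filter_pyRange_all {u w : Int} (p : Int → Bool)
    (h : ∀ s, u ≤ s → s < w → p s = true) :
    (PySem.List.pyRange u w 1).filter p = PySem.List.pyRange u w 1 := by
  rw [List.filter_eq_self]
  intro s hs
  have hm := PySem.List.mem_pyRange_one.mp hs
  exact h s hm.1 hm.2

theorem filter_pyRange_interval {u w a b : Int} (p : Int → Bool)
    (hua : u ≤ a) (hab : a ≤ b) (hbw : b + 1 ≤ w)
    (h : ∀ s, u ≤ s → s < w → (p s = true ↔ a ≤ s ∧ s ≤ b)) :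
    (PySem.List.pyRange u w 1).filter p = PySem.List.pyRange a (b+1) 1 := by
  rw [PySem.List.pyRange_one_append u a w hua (by omega),
    PySem.List.pyRange_one_append a (b+1) w (by omega) hbw,
    List.filter_append, List.filter_append]
  rw [filter_pyRange_nil p (fun s h1 h2 => by
      have := h s (by omega) (by omega)
      rcases Bool.eq_false_or_eq_true (p s) with ht | hf
      · exact absurd (this.mp ht) (by omega)
      · exact hf),
    filter_pyRange_all p (fun s h1 h2 => (h s (by omega) (by omega)).mpr ⟨by omega, by omega⟩),
    filter_pyRange_nil p (fun s h1 h2 => by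
      have := h s (by omega) (by omega)
      rcases Bool.eq_false_or_eq_true (p s) with ht | hf
      · exact absurd (this.mp ht) (by omega)
      · exact hf)]
  simp

theorem bSearchLow_spec (lo v : Int) : ∀ (n : Nat) (a r : Int), (r - a).toNat ≤ n →
    1 ≤ a → a ≤ r → r ≤ v → lo ≤ bX r v → (∀ s, 1 ≤ s → s < a → bX s v < lo) →
    a ≤ bSearchLow lo v a r ∧ bSearchLow lo v a r ≤ r ∧ lo ≤ bX (bSearchLow lo v a r) v ∧
      (∀ s, 1 ≤ s → s < bSearchLow lo v a r → bX s v < lo) := by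
  intro n
  induction n with
  | zero =>
    intro a r hn h1 har hrv hr hlow
    have : a = r := by omega
    subst this
    rw [bSearchLow, dif_neg (lt_irrefl a)]
    exact ⟨le_rfl, le_rfl, hr, hlow⟩
  | succ n ih =>
    intro a r hn h1 har hrv hr hlow
    rw [bSearchLow]
    by_cases hlt : a < r
    · rw [dif_pos hlt]
      have hm : a ≤ PySem.Int.floordiv (a + r) 2 ∧ PySem.Int.floordiv (a + r) 2 < r := by
        have := PySem.Int.floordiv_two_mid_bounds (le_of_lt hlt)
        rw [PySem.Int.floordiv_eq_ediv_of_pos (by norm_num)] at *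
        omega
      set m := PySem.Int.floordiv (a + r) 2 with hm_def
      by_cases hc : lo ≤ bX m v
      · rw [if_pos hc]
        have h' := ih a m (by omega) h1 hm.1 (by omega) hc hlow
        exact ⟨h'.1, le_trans h'.2.1 (le_of_lt hm.2), h'.2.2.1, h'.2.2.2⟩
      · rw [if_neg hc]
        have hlow' : ∀ s, 1 ≤ s → s < m + 1 → bX s v < lo := by
          intro s hs1 hsm
          by_cases hsa : s < a
          · exact hlow s hs1 hsa
          · have := bX_mono v s m (by omega) (by omega)
            omega
        have := ih (m+1) r (by omega) (by omega) (by omega) hrv hr hlow'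
        exact ⟨by omega, this.2.1, this.2.2.1, this.2.2.2⟩
    · rw [dif_neg hlt]
      have haR : a = r := by omega
      subst haR
      exact ⟨le_rfl, le_rfl, hr, hlow⟩

theorem bSearchHigh_spec (hi v : Int) : ∀ (n : Nat) (b r : Int), (r - b).toNat ≤ n →
    b ≤ r → r ≤ v → bX b v ≤ hi → (∀ s, r < s → s ≤ v → hi < bX s v) →
    b ≤ bSearchHigh hi v b r ∧ bSearchHigh hi v b r ≤ r ∧ bX (bSearchHigh hi v b r) v ≤ hi ∧
      (∀ s, bSearchHigh hi v b r < s → s ≤ v → hi < bX s v) := by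
  intro n
  induction n with
  | zero =>
    intro b r hn hbr hrv hb hhigh
    have : b = r := by omega
    subst this
    rw [bSearchHigh, dif_neg (lt_irrefl b)]
    exact ⟨le_rfl, le_rfl, hb, hhigh⟩
  | succ n ih =>
    intro b r hn hbr hrv hb hhigh
    rw [bSearchHigh]
    by_cases hlt : b < r
    · rw [dif_pos hlt]
      have hm : b < PySem.Int.floordiv (b + r + 1) 2 ∧ PySem.Int.floordiv (b + r + 1) 2 ≤ r := by
        have := PySem.Int.floordiv_two_mid_bounds (lo := b + 1) (hi := r) (by omega)
        rw [PySem.Int.floordiv_eq_ediv_of_pos (by norm_num)] at *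
        constructor <;> omega
      set m := PySem.Int.floordiv (b + r + 1) 2 with hm_def
      by_cases hc : bX m v ≤ hi
      · rw [if_pos hc]
        have := ih m r (by omega) (by omega) hrv hc hhigh
        exact ⟨by omega, this.2.1, this.2.2.1, this.2.2.2⟩
      · rw [if_neg hc]
        have hhigh' : ∀ s, m - 1 < s → s ≤ v → hi < bX s v := by
          intro s hs1 hs2
          by_cases hsr : r < s
          · exact hhigh s hsr hs2
          · have := bX_mono v m s (by omega) (by omega)
            omega
        have := ih b (m-1) (by omega) (by omega) (by omega) hb hhigh'
        exact ⟨this.1, by omega, this.2.2.1, this.2.2.2⟩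
    · rw [dif_neg hlt]
      have hbR : b = r := by omega
      subst hbR
      exact ⟨le_rfl, le_rfl, hb, hhigh⟩

-- A's inner loop in closed form: the valid steps in [1, v] plus the rest extension
theorem loop_closed (lo hi v : Int) (h1 : 1 ≤ v) :
    valid_xs_loop lo hi v.toNat v 0 0 PySem.Set.empty =
      (PySem.List.pyRange 1 (v+1) 1).filter (fun s => decide (lo ≤ bX s v ∧ bX s v ≤ hi))
      ++ (if lo ≤ bX v v ∧ bX v v ≤ hi then PySem.List.pyRange (v+1) 10000 1 else []) := by
  have h0 := loop_eq_WSteps lo hi v v.toNat 0 [] (by omega) List.nodup_nil (by simp)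
  rw [sub_zero, bX_zero] at h0
  have h0' : valid_xs_loop lo hi v.toNat v 0 0 PySem.Set.empty = WSteps lo hi v v.toNat 0 := by
    simpa [PySem.Set.empty] using h0
  rw [h0', WSteps_closed lo hi v v.toNat 0 (by omega) le_rfl]
  congr 1
  have hiff : (0 < v ∧ lo ≤ bX v v ∧ bX v v ≤ hi) ↔ (lo ≤ bX v v ∧ bX v v ≤ hi) :=
    ⟨fun h => h.2, fun h => ⟨by omega, h⟩⟩
  rw [if_congr hiff rfl rfl]

-- per-init_v equality of the two fold bodies
theorem body_eq (lo hi : Int) (valid : List (Int × List Int)) (v : Int) (h1 : 1 ≤ v) :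
    (let vs := valid_xs_loop lo hi v.toNat v 0 0 PySem.Set.empty
     if ¬ vs = [] then valid ++ [(v, vs)] else valid) =
    (let rest := PySem.Int.floordiv (v * (v + 1)) 2
     if rest < lo then valid
     else
       let a := bSearchLow lo v 1 v
       if hi < bX a v then valid
       else
         let b := bSearchHigh hi v a v
         let steps := PySem.Set.ofList (PySem.List.pyRange a (b + 1) 1)
         let steps := if b = v then
             PySem.Set.union steps (PySem.Set.ofList (PySem.List.pyRange (v + 1) 10000 1))
           else steps
         valid ++ [(v, steps)]) := by
  simp only [rest_eq]
  rw [loop_closed lo hi v h1]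
  by_cases hrest : bX v v < lo
  · rw [if_pos hrest]
    have hfil := filter_pyRange_nil (u := 1) (w := v+1)
      (fun s => decide (lo ≤ bX s v ∧ bX s v ≤ hi))
      (fun s hs1 hs2 => by
        have hms := bX_mono v s v (by omega) le_rfl
        simp only [decide_eq_false_iff_not]
        omega)
    have hext : ¬ (lo ≤ bX v v ∧ bX v v ≤ hi) := by intro h; omega
    rw [hfil, if_neg hext]
    simp
  · rw [if_neg hrest]
    have hlo : lo ≤ bX v v := by omega
    have hA := bSearchLow_spec lo v (v - 1).toNat 1 v (by omega) le_rfl (by omega) le_rfl hlo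
      (fun s hs1 hs2 => by omega)
    set a := bSearchLow lo v 1 v with ha_def
    by_cases hhi : hi < bX a v
    · rw [if_pos hhi]
      have hfil := filter_pyRange_nil (u := 1) (w := v+1)
        (fun s => decide (lo ≤ bX s v ∧ bX s v ≤ hi))
        (fun s hs1 hs2 => by
          simp only [decide_eq_false_iff_not]
          by_cases hsa : s < a
          · have := hA.2.2.2 s hs1 hsa
            omega
          · have := bX_mono v a s (by omega) (by omega)
            omega)
      have hext : ¬ (lo ≤ bX v v ∧ bX v v ≤ hi) := by
        intro h
        have := bX_mono v a v hA.2.1 le_rfl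
        omega
      rw [hfil, if_neg hext]
      simp
    · rw [if_neg hhi]
      have hB := bSearchHigh_spec hi v (v - a).toNat a v (by omega) hA.2.1 le_rfl (by omega)
        (fun s hs1 hs2 => by omega)
      set b := bSearchHigh hi v a v with hb_def
      have hfil := filter_pyRange_interval (u := 1) (w := v+1) (a := a) (b := b)
        (fun s => decide (lo ≤ bX s v ∧ bX s v ≤ hi)) hA.1 hB.1 (by omega)
        (fun s hs1 hs2 => by
          simp only [decide_eq_true_eq]
          constructor
          · intro hsp
            constructor
            · by_contra hc
              have := hA.2.2.2 s hs1 (by omega)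
              omega
            · by_contra hc
              have := hB.2.2.2 s (by omega) (by omega)
              omega
          · intro hab
            constructor
            · have := bX_mono v a s hab.1 (by omega)
              omega
            · have := bX_mono v s b hab.2 (by omega)
              omega)
      rw [hfil]
      have hne : PySem.List.pyRange a (b+1) 1 ≠ [] := by
        rw [PySem.List.pyRange_one_cons (show a < b + 1 by omega)]
        simp
      have hof : PySem.Set.ofList (PySem.List.pyRange a (b+1) 1) = PySem.List.pyRange a (b+1) 1 :=
        PySem.Set.ofList_eq_self_of_nodup _ (PySem.List.nodup_pyRange_one _ _)
      by_cases hbv : b = v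
      · have hext : lo ≤ bX v v ∧ bX v v ≤ hi := ⟨hlo, by have htmp := hB.2.2.1; rw [hbv] at htmp; exact htmp⟩
        rw [if_pos hext, if_pos hbv, hof]
        have hR : PySem.Set.ofList (PySem.List.pyRange (v+1) 10000 1) =
            PySem.List.pyRange (v+1) 10000 1 :=
          PySem.Set.ofList_eq_self_of_nodup _ (PySem.List.nodup_pyRange_one _ _)
        rw [hR]
        rw [show PySem.Set.union (PySem.List.pyRange a (b+1) 1) (PySem.List.pyRange (v+1) 10000 1) =
            PySem.List.pyRange a (b+1) 1 ++ PySem.List.pyRange (v+1) 10000 1 from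
          PySem.Set.update_eq_append_of_disjoint _ _ (PySem.List.nodup_pyRange_one _ _)
            (fun x hx hmem => by
              have hx1 := PySem.List.mem_pyRange_one.mp hx
              have hx2 := PySem.List.mem_pyRange_one.mp hmem
              omega)]
        rw [if_pos (show ¬ (PySem.List.pyRange a (b+1) 1 ++ PySem.List.pyRange (v+1) 10000 1) = []
          from fun hc => hne (by
            rcases List.append_eq_nil_iff.mp hc with ⟨hc1, _⟩
            exact hc1))]
      · have hext : ¬ (lo ≤ bX v v ∧ bX v v ≤ hi) := by
          intro h
          apply hbv
          by_contra hc
          have := hB.2.2.2 v (by omega) le_rfl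
          omega
        rw [if_neg hext, if_neg hbv, hof]
        rw [List.append_nil]
        rw [if_pos (show ¬ PySem.List.pyRange a (b+1) 1 = [] from hne)]
-- ===== VERDICT (by name: the statement is the Claim_ definition above) =====
theorem valid_xs_spec : Claim_equal_valid_xs := by
  intro target _
  unfold Spec_valid_xs valid_xs valid_xs_alt
  apply PySem.List.foldl_congr_mem
  intro acc x hx
  have hx1 : 1 ≤ x := (PySem.List.mem_pyRange_one.mp hx).1
  simpa using body_eq target.1 target.2 acc x hx1
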